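-- pv_equiv track=rewrite | github.com/mercerx02/Itransition-Course | Task 3/game.py | generate_winner_matrix
-- ===== SOURCE A (Python) =====
-- def generate_winner_matrix(num_choices):
--     winner_matrix = [["" for _ in range(num_choices)] for _ in range(num_choices)]
--     for i in range(num_choices):
--         for j in range(num_choices):
--             if i == j:
--                 winner_matrix[i][j] = "Draw"
--             else:
--                 diff = (j - i) % num_choices
--                 if diff <= num_choices // 2:
--                     winner_matrix[i][j] = "Win"
--                 else:
--                     winner_matrix[i][j] = "Lose"
--     return winner_matrix
-- ===== SOURCE B (Python) =====
-- def generate_winner_matrix(num_choices):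
--     # Build row 0 once as three concatenated blocks (Draw, a run of Wins, a run
--     # of Loses); every later row is the cyclic right-rotation of the previous
--     # row. No per-cell branching or modular arithmetic at all.
--     half = num_choices // 2
--     row = ["Draw"] + ["Win"] * half + ["Lose"] * (num_choices - 1 - half)
--     matrix = []
--     for _ in range(num_choices):
--         matrix.append(row)
--         row = row[-1:] + row[:-1]
--     return matrix
-- ===== Notes on version B (the rewrite author's own statement) =====
-- stated objective: alternative
-- what changed: B builds row 0 once as three concatenated blocks (Draw, a run of Wins, a run of Loses) and derives every subsequent row as a cyclic right-rotation of the previous row, eliminating A's per-cell diagonal test, modular difference and threshold comparison.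
import Mathlib
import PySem

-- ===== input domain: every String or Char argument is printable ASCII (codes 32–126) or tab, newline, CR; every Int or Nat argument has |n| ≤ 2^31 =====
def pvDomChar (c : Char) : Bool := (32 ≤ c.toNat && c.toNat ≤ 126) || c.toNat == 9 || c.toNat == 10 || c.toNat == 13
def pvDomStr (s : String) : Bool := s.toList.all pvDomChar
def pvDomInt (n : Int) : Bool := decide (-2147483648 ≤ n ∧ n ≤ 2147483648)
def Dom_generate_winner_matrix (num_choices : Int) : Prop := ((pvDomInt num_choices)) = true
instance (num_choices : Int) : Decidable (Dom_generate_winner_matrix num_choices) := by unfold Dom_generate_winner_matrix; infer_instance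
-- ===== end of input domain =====

-- B builds row 0 once as three concatenated blocks (Draw, Wins, Loses) and derives each
-- later row as a cyclic right-rotation of the previous one, with no per-cell branching
-- or modular arithmetic (objective: alternative).

-- ===== PORT A =====
def generate_winner_matrix (num_choices : Int) : List (List String) :=
  let winner_matrix := (PySem.List.pyRange 0 num_choices 1).map
    (fun _ => (PySem.List.pyRange 0 num_choices 1).map (fun _ => ""))
  (PySem.List.pyRange 0 num_choices 1).foldl (fun m i =>
    (PySem.List.pyRange 0 num_choices 1).foldl (fun m j =>
      if i == j then
        PySem.List.pySetD m i (PySem.List.pySetD (PySem.List.pyGetD m i []) j "Draw")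
      else
        let diff := PySem.Int.mod (j - i) num_choices
        if diff ≤ PySem.Int.floordiv num_choices 2 then
          PySem.List.pySetD m i (PySem.List.pySetD (PySem.List.pyGetD m i []) j "Win")
        else
          PySem.List.pySetD m i (PySem.List.pySetD (PySem.List.pyGetD m i []) j "Lose")) m)
    winner_matrix

-- ===== PORT B =====
def generate_winner_matrix_alt (num_choices : Int) : List (List String) :=
  let half := PySem.Int.floordiv num_choices 2
  -- ["Win"] * half : Python list repetition (empty for a non-positive count) — exact as List.replicate of the clamped count
  let row0 : List String :=
    "Draw" :: (List.replicate half.toNat "Win" ++ List.replicate (num_choices - 1 - half).toNat "Lose")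
  let p := (PySem.List.pyRange 0 num_choices 1).foldl
    (fun (st : List (List String) × List String) _ =>
      (st.1 ++ [st.2],
       PySem.List.slice st.2 (some (-1)) none ++ PySem.List.slice st.2 none (some (-1))))
    (([] : List (List String)), row0)
  p.1

-- ===== PRECONDITION & SPEC =====
def Spec_generate_winner_matrix (num_choices : Int) (out : List (List String)) : Prop := out = generate_winner_matrix_alt num_choices
instance (num_choices : Int) (out : List (List String)) : Decidable (Spec_generate_winner_matrix num_choices out) := by unfold Spec_generate_winner_matrix; infer_instance

-- ===== CLAIM (what is proved, stated in full; the proofs are below) =====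
def Claim_equal_generate_winner_matrix : Prop := ∀ (num_choices : Int), Dom_generate_winner_matrix num_choices → Spec_generate_winner_matrix num_choices (generate_winner_matrix num_choices)

-- ===== LEMMAS AND PROOFS =====

-- The common target: cell (i,j) of the matrix, with Nat indices below n.toNat.
def pvCell (n : Int) (i j : Nat) : String :=
  if i = j then "Draw"
  else if PySem.Int.mod ((j : Int) - (i : Int)) n ≤ PySem.Int.floordiv n 2 then "Win" else "Lose"

def pvTgt (n : Int) : List (List String) :=
  (List.range n.toNat).map (fun i => (List.range n.toNat).map (fun j => pvCell n i j))

lemma pv_set_boundary {α : Type} (xs ys : List α) (v : α) (k : Nat) (hk : xs.length = k)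
    (hys : ys ≠ []) : (xs ++ ys).set k v = xs ++ v :: ys.tail := by
  subst hk
  cases ys with
  | nil => exact absurd rfl hys
  | cons a ys => simp

-- Filling a row left to right by set equals mapping, tracked with the untouched suffix.
lemma pv_row_fill (g : Nat → String) (row : List String) (k : Nat) (hk : k ≤ row.length) :
    (List.range k).foldl (fun r j => r.set j (g j)) row
      = (List.range k).map g ++ row.drop k := by
  induction k with
  | zero => simp
  | succ k ih =>
    rw [List.range_succ, List.foldl_append, ih (by omega)]
    simp only [List.foldl_cons, List.foldl_nil]
    rw [pv_set_boundary ((List.range k).map g) (row.drop k) (g k) k (by simp)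
      (by rw [ne_eq, List.drop_eq_nil_iff]; omega)]
    simp [List.tail_drop]

-- The inner fold (setting cells of row i) factors as one set of row i.
lemma pv_inner_fold (g : Nat → String) (i : Nat) :
    ∀ (js : List Nat) (m : List (List String)), i < m.length →
    js.foldl (fun m j => m.set i ((m[i]?.getD []).set j (g j))) m
      = m.set i (js.foldl (fun r j => r.set j (g j)) (m[i]?.getD [])) := by
  intro js
  induction js with
  | nil =>
    intro m hi
    simp only [List.foldl_nil]
    rw [List.getElem?_eq_getElem hi]
    exact (List.set_getElem_self hi).symm
  | cons j js ih =>
    intro m hi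
    simp only [List.foldl_cons]
    rw [ih _ (by simpa using hi)]
    rw [List.getElem?_set_self (by simpa using hi)]
    simp [List.set_set]

-- The whole nested fold produces the target matrix (Nat-indexed form).
lemma pv_fill (f : Nat → Nat → String) (n : Nat) (k : Nat) (hk : k ≤ n) :
    (List.range k).foldl (fun m i =>
        (List.range n).foldl (fun m j => m.set i ((m[i]?.getD []).set j (f i j))) m)
      ((List.range n).map (fun _ => (List.range n).map (fun _ => "")))
      = (List.range k).map (fun i => (List.range n).map (f i))
        ++ ((List.range n).map (fun _ => (List.range n).map (fun _ => ""))).drop k := by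
  set m0 : List (List String) := (List.range n).map (fun _ => (List.range n).map (fun _ => "")) with hm0
  have hm0len : m0.length = n := by simp [hm0]
  induction k with
  | zero => simp
  | succ k ih =>
    rw [List.range_succ, List.foldl_append, ih (by omega)]
    simp only [List.foldl_cons, List.foldl_nil]
    set pre : List (List String) := (List.range k).map (fun i => (List.range n).map (f i)) with hpre
    have hprelen : pre.length = k := by simp [hpre]
    have hlen : (pre ++ m0.drop k).length = n := by simp [hprelen, hm0len]; omega
    rw [pv_inner_fold (f k) k _ _ (by omega)]
    have hget : (pre ++ m0.drop k)[k]?.getD [] = (List.range n).map (fun _ => "") := by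
      rw [List.getElem?_append_right (by omega), List.getElem?_eq_getElem
        (by simp [hm0len, hprelen]; omega)]
      simp [hm0, hprelen]
    rw [hget, pv_row_fill (f k) _ n (by simp)]
    rw [show (((List.range n).map (fun (_ : Nat) => "")).drop n) = [] from by simp,
      List.append_nil]
    rw [pv_set_boundary pre (m0.drop k) _ k hprelen
      (by rw [ne_eq, List.drop_eq_nil_iff]; omega)]
    simp [List.tail_drop, hpre]

-- 0 ≤ d = (j - i) % n < n, and d = 0 exactly on the diagonal.
lemma pv_mod_cases (n i j : Int) (h0i : 0 ≤ i) (hi : i < n) (h0j : 0 ≤ j) (hj : j < n) :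
    (i = j ∧ (j - i) % n = 0) ∨ (i ≠ j ∧ 1 ≤ (j - i) % n ∧ (j - i) % n < n) := by
  rcases le_or_gt i j with hle | hgt
  · have h : (j - i) % n = j - i := Int.emod_eq_of_lt (by omega) (by omega)
    rcases eq_or_lt_of_le hle with heq | hlt
    · exact Or.inl ⟨heq, by omega⟩
    · right; refine ⟨by omega, by omega⟩
  · have h : (j - i + n) % n = (j - i) % n := by
      rw [show j - i + n = j - i + n * 1 by ring, Int.add_mul_emod_self_left]
    have h2 : (j - i + n) % n = j - i + n := Int.emod_eq_of_lt (by omega) (by omega)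
    right; refine ⟨by omega, by omega⟩

-- A equals the target.
lemma pv_A_fold (n : Int) : generate_winner_matrix n
    = (List.range n.toNat).foldl (fun (m : List (List String)) (i : Nat) =>
        (List.range n.toNat).foldl (fun (m : List (List String)) (j : Nat) =>
          m.set i ((m[i]?.getD []).set j (pvCell n i j))) m)
      ((List.range n.toNat).map (fun _ => (List.range n.toNat).map (fun _ => ""))) := by
  unfold generate_winner_matrix
  rw [PySem.List.pyRange_one]
  simp only [Int.sub_zero, zero_add, List.foldl_map, List.map_map, Function.comp_def,
    PySem.List.pySetD_natCast, PySem.List.pyGetD_natCast, List.getD_eq_getElem?_getD,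
    beq_iff_eq, Nat.cast_inj]
  congr 1
  funext m i
  apply PySem.List.foldl_congr_mem
  intro acc j _
  unfold pvCell
  by_cases hij : i = j
  · simp [hij]
  · rw [if_neg hij, if_neg hij]
    split <;> rfl

lemma pv_A_eq_tgt (n : Int) : generate_winner_matrix n = pvTgt n := by
  rw [pv_A_fold, pv_fill (pvCell n) n.toNat n.toNat le_rfl]
  simp [pvTgt]

-- ===== B side =====

-- The diff-indexed outcome, and row i as a map over column indices.
def pvC (n d : Int) : String :=
  if d = 0 then "Draw" else if d ≤ PySem.Int.floordiv n 2 then "Win" else "Lose"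

def pvRow (n : Int) (i : Nat) : List String :=
  (List.range n.toNat).map (fun (j : Nat) => pvC n (((j : Int) - (i : Int)) % n))

-- The initial block row equals pvRow 0 (for positive n).
lemma pv_row0 (n : Int) (hn : 0 < n) :
    ("Draw" :: (List.replicate (PySem.Int.floordiv n 2).toNat "Win"
      ++ List.replicate (n - 1 - PySem.Int.floordiv n 2).toNat "Lose")) = pvRow n 0 := by
  have hfd : PySem.Int.floordiv n 2 = n / 2 := PySem.Int.floordiv_eq_ediv_of_pos (by omega)
  have h0 : 0 ≤ n / 2 := Int.ediv_nonneg (by omega) (by omega)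
  have h1 : n / 2 ≤ n - 1 := by omega
  apply List.ext_getElem
  · simp [pvRow]; omega
  · intro k hk hk'
    have hkn : k < n.toNat := by simpa [pvRow] using hk'
    have hkI : (k : Int) < n := by omega
    simp only [pvRow]
    rw [List.getElem_map, List.getElem_range]
    have hmod : ((k : Int) - (0 : Int)) % n = (k : Int) := by
      rw [Int.sub_zero, Int.emod_eq_of_lt (by omega) hkI]
    rw [Nat.cast_zero, hmod]
    unfold pvC
    rcases Nat.eq_zero_or_pos k with h | h
    · subst h; simp
    · rw [List.getElem_cons]
      rw [if_neg (by omega : ¬ (k : Int) = 0), dif_neg (by omega : ¬ k = 0)]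
      by_cases hw : (k : Int) ≤ PySem.Int.floordiv n 2
      · rw [if_pos hw, List.getElem_append_left (by simp; omega)]
        simp
      · rw [if_neg hw, List.getElem_append_right (by simp; omega)]
        simp

-- Rotating a range-map: last element to the front.
lemma pv_rot_gen {a : Type} (g : Nat → a) (m : Nat) :
    (((List.range (m+1)).map g).drop ((((List.range (m+1)).map g).length) - 1))
      ++ ((List.range (m+1)).map g).dropLast
    = g m :: (List.range m).map g := by
  rw [List.range_succ, List.map_append, List.map_singleton, List.dropLast_concat]
  have h : (((List.range m).map g) ++ [g m]).length - 1 = ((List.range m).map g).length := by simp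
  rw [h, List.drop_left]
  rfl

-- Right rotation advances the row index.
lemma pv_rot (n : Int) (hn : 0 < n) (i : Nat) :
    PySem.List.slice (pvRow n i) (some (-1)) none
      ++ PySem.List.slice (pvRow n i) none (some (-1)) = pvRow n (i + 1) := by
  rw [PySem.List.slice_from_neg_one, PySem.List.slice_to_neg_one]
  have hm : n.toNat = (n.toNat - 1) + 1 := by omega
  set m := n.toNat - 1 with hmdef
  unfold pvRow
  rw [hm, pv_rot_gen, List.range_succ_eq_map, List.map_cons, List.map_map]
  congr 1
  · congr 1
    have h2 : ((m : Int)) - (i : Int) = ((0 : Nat) : Int) - ((i + 1 : Nat) : Int) + n * 1 := by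
      push_cast; omega
    rw [h2, Int.add_mul_emod_self_left]
  · apply List.map_congr_left
    intro j _
    show pvC n (((j : Int) - (i : Int)) % n)
        = pvC n (((((j + 1 : Nat)) : Int) - (((i + 1 : Nat)) : Int)) % n)
    have h3 : (((j + 1 : Nat)) : Int) - (((i + 1 : Nat)) : Int) = (j : Int) - (i : Int) := by
      push_cast; ring
    rw [h3]

-- Fold invariant: after the k-th step the matrix holds rows 0..k-1 and the row is pvRow k.
lemma pv_B_inv (n : Int) (hn : 0 < n) (k : Nat) (hk : k ≤ n.toNat) :
    (List.range k).foldl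
      (fun (st : List (List String) × List String) _ =>
        (st.1 ++ [st.2],
         PySem.List.slice st.2 (some (-1)) none ++ PySem.List.slice st.2 none (some (-1))))
      (([] : List (List String)), pvRow n 0)
    = ((List.range k).map (pvRow n), pvRow n k) := by
  induction k with
  | zero => simp
  | succ k ih =>
    rw [List.range_succ, List.foldl_append, ih (by omega)]
    simp only [List.foldl_cons, List.foldl_nil]
    rw [pv_rot n hn k]
    simp

-- B equals the target.
lemma pv_B_eq_tgt (n : Int) : generate_winner_matrix_alt n = pvTgt n := by
  unfold generate_winner_matrix_alt
  rcases le_or_gt n 0 with hn | hn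
  · rw [PySem.List.pyRange_one_eq_nil hn]
    simp [pvTgt, Int.toNat_of_nonpos hn]
  · rw [PySem.List.pyRange_one]
    simp only [Int.sub_zero, List.foldl_map]
    rw [pv_row0 n hn, pv_B_inv n hn n.toNat le_rfl]
    unfold pvTgt
    apply List.map_congr_left
    intro i hi
    unfold pvRow
    apply List.map_congr_left
    intro j hj
    have hiI : (i : Int) < n := by have := List.mem_range.mp hi; omega
    have hjI : (j : Int) < n := by have := List.mem_range.mp hj; omega
    have hmodeq : PySem.Int.mod ((j : Int) - (i : Int)) n = ((j : Int) - (i : Int)) % n :=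
      PySem.Int.mod_eq_emod_of_pos hn
    rcases pv_mod_cases n i j (by omega) hiI (by omega) hjI with ⟨heq, hz⟩ | ⟨hne, h1, h2⟩
    · unfold pvC pvCell
      rw [hz, if_pos rfl, if_pos (show i = j by exact_mod_cast heq)]
    · unfold pvC pvCell
      rw [hmodeq, if_neg (show ¬ ((j : Int) - (i : Int)) % n = 0 by omega),
        if_neg (show ¬ i = j from fun h => hne (by exact_mod_cast h))]

-- ===== VERDICT (by name: the statement is the Claim_ definition above) =====
theorem generate_winner_matrix_spec : Claim_equal_generate_winner_matrix := by
  intro n _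
  unfold Spec_generate_winner_matrix
  rw [pv_A_eq_tgt, pv_B_eq_tgt]
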